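-- pv_equiv track=rewrite | github.com/GFrosi/ChIP-Atlas-extraction | get_cctrol_cellLine/get_cellline.py | create_dict_ip_cctrol
-- ===== SOURCE A (Python) =====
-- def create_dict_ip_cctrol(dict1, dict2):
--     """Receives two dicts and returns
--     a new dict where the keys are SRX
--     (IPs), and the values are lists of
--     suggested inputs"""
--
--     new_dict = {}
--     for k,v in dict1.items():
--         for k2,v2 in dict2.items():
--             if v == v2:
--                 if k not in new_dict.keys():
--                     new_dict[k] = [k2]
--                 else:
--                     new_dict[k].append(k2)
--
--         if k not in new_dict.keys():
--             new_dict[k] = ['None']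
--
--     return new_dict
-- ===== SOURCE B (Python) =====
-- def create_dict_ip_cctrol(dict1, dict2):
--     """Receives two dicts and returns a new dict where the keys are SRX
--     (IPs), and the values are lists of suggested inputs"""
--     by_value = {}
--     for k2, v2 in dict2.items():
--         by_value.setdefault(v2, []).append(k2)
--     new_dict = {}
--     for k, v in dict1.items():
--         new_dict[k] = by_value.get(v, ['None'])
--     return new_dict
-- ===== Notes on version B (the rewrite author's own statement) =====
-- stated objective: faster
-- what changed: B builds one value->keys index of dict2 with setdefault in a single pass and then fills the result with one lookup per dict1 entry, removing A's inner scan of dict2 for every dict1 key.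
import Mathlib
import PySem

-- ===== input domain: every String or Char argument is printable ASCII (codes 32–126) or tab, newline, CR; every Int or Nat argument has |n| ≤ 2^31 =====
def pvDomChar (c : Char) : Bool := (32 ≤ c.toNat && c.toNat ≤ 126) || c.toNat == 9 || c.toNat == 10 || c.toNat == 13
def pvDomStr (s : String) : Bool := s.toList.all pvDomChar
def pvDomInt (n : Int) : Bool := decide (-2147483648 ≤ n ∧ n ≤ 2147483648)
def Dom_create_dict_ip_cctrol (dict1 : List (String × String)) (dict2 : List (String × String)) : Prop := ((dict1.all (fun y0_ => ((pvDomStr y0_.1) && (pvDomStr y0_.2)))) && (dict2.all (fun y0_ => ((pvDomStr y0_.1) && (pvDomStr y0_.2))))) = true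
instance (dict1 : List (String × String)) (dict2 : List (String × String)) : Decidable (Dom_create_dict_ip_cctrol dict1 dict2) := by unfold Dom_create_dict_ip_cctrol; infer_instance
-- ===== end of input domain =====

-- B replaces A's nested scan of dict2 for every dict1 key by a value->keys index of
-- dict2 built once, then one lookup per dict1 entry (objective: faster, O(n+m) vs O(n*m)).

-- ===== PORT A =====
def create_dict_ip_cctrol (dict1 : List (String × String)) (dict2 : List (String × String)) : List (String × List String) :=
  (dict1.foldl (fun nd kv =>
      let nd2 := dict2.foldl (fun nd kv2 =>
          if kv.2 == kv2.2 then
            if nd.contains kv.1 = false then nd.insert kv.1 [kv2.1]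
            else nd.modify kv.1 [] (· ++ [kv2.1])
          else nd) nd
      if nd2.contains kv.1 = false then nd2.insert kv.1 ["None"] else nd2)
    PySem.Dict.empty).items

-- ===== PORT B =====
def create_dict_ip_cctrol_alt (dict1 : List (String × String)) (dict2 : List (String × String)) : List (String × List String) :=
  let byValue := dict2.foldl (fun d kv2 => d.modify kv2.2 [] (· ++ [kv2.1])) PySem.Dict.empty
  (dict1.foldl (fun nd kv => nd.insert kv.1 (byValue.getD kv.2 ["None"])) PySem.Dict.empty).items

-- ===== PRECONDITION & SPEC =====
-- Pre_ excludes association lists with duplicate keys: those do not represent Python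
-- dicts (dict construction deduplicates), so no behaviour of the Python functions is
-- being claimed there.
def Pre_create_dict_ip_cctrol (dict1 : List (String × String)) (dict2 : List (String × String)) : Prop :=
  (dict1.map Prod.fst).Nodup ∧ (dict2.map Prod.fst).Nodup
instance (dict1 : List (String × String)) (dict2 : List (String × String)) : Decidable (Pre_create_dict_ip_cctrol dict1 dict2) := by unfold Pre_create_dict_ip_cctrol; infer_instance

def pvWitness_create_dict_ip_cctrol : (List (String × String)) × (List (String × String)) :=
  ([("srx1", "hela"), ("srx2", "k562")], [("ctl1", "hela"), ("ctl2", "hela")])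

def Spec_create_dict_ip_cctrol (dict1 : List (String × String)) (dict2 : List (String × String)) (out : List (String × List String)) : Prop := out = create_dict_ip_cctrol_alt dict1 dict2
instance (dict1 : List (String × String)) (dict2 : List (String × String)) (out : List (String × List String)) : Decidable (Spec_create_dict_ip_cctrol dict1 dict2 out) := by unfold Spec_create_dict_ip_cctrol; infer_instance

-- ===== CLAIM (what is proved, stated in full; the proofs are below) =====
def Claim_equal_create_dict_ip_cctrol : Prop := ∀ (dict1 : List (String × String)) (dict2 : List (String × String)), Dom_create_dict_ip_cctrol dict1 dict2 → Pre_create_dict_ip_cctrol dict1 dict2 → Spec_create_dict_ip_cctrol dict1 dict2 (create_dict_ip_cctrol dict1 dict2)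

-- ===== LEMMAS AND PROOFS =====

-- the dict2 keys whose value equals v, in order
def pvMatches (v : String) (dict2 : List (String × String)) : List String :=
  (dict2.filter (fun kv2 => kv2.2 == v)).map Prod.fst

-- the value A ends up storing for a dict1 entry with value v
def pvValFor (v : String) (dict2 : List (String × String)) : List String :=
  if pvMatches v dict2 = [] then ["None"] else pvMatches v dict2

theorem pv_modify_insert (d : PySem.Dict String (List String)) (k : String) (a : List String)
    (f : List String → List String) :
    (d.insert k a).modify k [] f = d.insert k (f a) := by
  simp [PySem.Dict.modify, pysem]

-- inner loop of A once k is already present (value acc): it appends the matches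
theorem pv_inner_present (k v : String) (l : List (String × String))
    (d : PySem.Dict String (List String)) (acc : List String) :
    l.foldl (fun nd kv2 =>
        if v == kv2.2 then
          if nd.contains k = false then nd.insert k [kv2.1]
          else nd.modify k [] (· ++ [kv2.1])
        else nd) (d.insert k acc)
      = d.insert k (acc ++ pvMatches v l) := by
  induction l generalizing acc with
  | nil => simp [pvMatches]
  | cons kv2 tl ih =>
    by_cases hv : v == kv2.2
    · simp only [List.foldl_cons, hv, if_true, PySem.Dict.contains_insert_self,
        Bool.true_eq_false, if_false, pv_modify_insert, ih]
      have hm : pvMatches v (kv2 :: tl) = kv2.1 :: pvMatches v tl := by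
        simp [pvMatches, List.filter_cons, BEq.comm (a := v)] at hv ⊢
        simp [hv]
      rw [hm, List.append_assoc]
      rfl
    · have hm : pvMatches v (kv2 :: tl) = pvMatches v tl := by
        simp [pvMatches, List.filter_cons, BEq.comm (a := v)] at hv ⊢
        simp [hv]
      rw [hm]
      have hv' : ¬ v = kv2.2 := by simpa using hv
      simpa [hv'] using ih acc

-- inner loop of A from a state not containing k
theorem pv_inner_absent (k v : String) (l : List (String × String))
    (d : PySem.Dict String (List String)) (h : d.contains k = false) :
    l.foldl (fun nd kv2 =>
        if v == kv2.2 then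
          if nd.contains k = false then nd.insert k [kv2.1]
          else nd.modify k [] (· ++ [kv2.1])
        else nd) d
      = if pvMatches v l = [] then d else d.insert k (pvMatches v l) := by
  induction l with
  | nil => simp [pvMatches]
  | cons kv2 tl ih =>
    by_cases hv : v == kv2.2
    · have hm : pvMatches v (kv2 :: tl) = kv2.1 :: pvMatches v tl := by
        simp [pvMatches, List.filter_cons, BEq.comm (a := v)] at hv ⊢
        simp [hv]
      simp only [List.foldl_cons, hv, if_true, h, pv_inner_present, hm]
      simp
    · have hm : pvMatches v (kv2 :: tl) = pvMatches v tl := by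
        simp [pvMatches, List.filter_cons, BEq.comm (a := v)] at hv ⊢
        simp [hv]
      rw [hm]
      have hv' : ¬ v = kv2.2 := by simpa using hv
      simpa [hv'] using ih

-- one outer step of A on a fresh key inserts pvValFor
theorem pv_outer_step (dict2 : List (String × String)) (d : PySem.Dict String (List String))
    (k v : String) (h : d.contains k = false) :
    (let nd2 := dict2.foldl (fun nd kv2 =>
          if v == kv2.2 then
            if nd.contains k = false then nd.insert k [kv2.1]
            else nd.modify k [] (· ++ [kv2.1])
          else nd) d
      if nd2.contains k = false then nd2.insert k ["None"] else nd2)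
      = d.insert k (pvValFor v dict2) := by
  rw [pv_inner_absent k v dict2 d h]
  by_cases hm : pvMatches v dict2 = []
  · simp [hm, h, pvValFor]
  · simp [hm, pvValFor, PySem.Dict.contains_insert_self]

-- A's outer loop over fresh distinct keys is an insert loop of pvValFor
theorem pv_outer_fold (dict2 : List (String × String)) (l : List (String × String))
    (d : PySem.Dict String (List String))
    (hnd : (l.map Prod.fst).Nodup) (hf : ∀ p ∈ l, d.contains p.1 = false) :
    l.foldl (fun nd kv =>
        (let nd2 := dict2.foldl (fun nd kv2 =>
              if kv.2 == kv2.2 then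
                if nd.contains kv.1 = false then nd.insert kv.1 [kv2.1]
                else nd.modify kv.1 [] (· ++ [kv2.1])
              else nd) nd
          if nd2.contains kv.1 = false then nd2.insert kv.1 ["None"] else nd2)) d
      = l.foldl (fun nd kv => nd.insert kv.1 (pvValFor kv.2 dict2)) d := by
  induction l generalizing d with
  | nil => rfl
  | cons p tl ih =>
    simp only [List.map_cons, List.nodup_cons] at hnd
    have hstep := pv_outer_step dict2 d p.1 p.2 (hf p (List.mem_cons_self))
    simp only [List.foldl_cons]
    rw [hstep]
    refine ih _ hnd.2 ?_
    intro q hq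
    rw [PySem.Dict.contains_insert]
    have hne : q.1 ≠ p.1 := by
      intro he
      exact hnd.1 (he ▸ List.mem_map_of_mem hq)
    simp [hne, hf q (List.mem_cons_of_mem _ hq)]

-- B's index lookup returns exactly pvValFor
theorem pv_byValue_getD (dict2 : List (String × String)) (v : String) :
    (dict2.foldl (fun d kv2 => d.modify kv2.2 [] (· ++ [kv2.1])) PySem.Dict.empty).getD v ["None"]
      = pvValFor v dict2 := by
  have hmap : dict2.foldl (fun d kv2 => d.modify kv2.2 [] (· ++ [kv2.1])) PySem.Dict.empty
      = (dict2.map Prod.swap).foldl (fun d p => d.modify p.1 [] (· ++ [p.2])) PySem.Dict.empty := by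
    rw [List.foldl_map]
    rfl
  have hget : (dict2.foldl (fun d kv2 => d.modify kv2.2 [] (· ++ [kv2.1]))
      PySem.Dict.empty).getD v [] = pvMatches v dict2 := by
    rw [hmap, PySem.Dict.getD_foldl_modify_append]
    simp [pvMatches, List.filter_map, List.map_map, Function.comp_def, Prod.swap]
  have hkeys : (dict2.foldl (fun d kv2 => d.modify kv2.2 [] (· ++ [kv2.1]))
      PySem.Dict.empty).keys = PySem.Set.update PySem.Dict.empty.keys (dict2.map (fun kv2 => kv2.2)) :=
    PySem.Dict.keys_foldl_modify_key dict2 (fun kv2 => kv2.2) [] (fun _ kv2 => (· ++ [kv2.1]))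
      PySem.Dict.empty
  by_cases hm : pvMatches v dict2 = []
  · -- no dict2 entry has value v, so v is not a key of the index
    have hno : v ∉ dict2.map (fun kv2 => kv2.2) := by
      intro hv
      rcases List.mem_map.mp hv with ⟨p, hp, hpv⟩
      have : p.1 ∈ pvMatches v dict2 := by
        refine List.mem_map.mpr ⟨p, List.mem_filter.mpr ⟨hp, ?_⟩, rfl⟩
        simp [hpv]
      simp [hm] at this
    have hc : (dict2.foldl (fun d kv2 => d.modify kv2.2 [] (· ++ [kv2.1]))
        PySem.Dict.empty).contains v = false := by
      rw [PySem.Dict.contains_eq_decide_mem_keys, hkeys]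
      simp [PySem.Set.mem_update, hno]
    have hnone : (dict2.foldl (fun d kv2 => d.modify kv2.2 [] (· ++ [kv2.1]))
        PySem.Dict.empty).get? v = none :=
      (PySem.Dict.get?_eq_none_iff_contains _ _).mpr hc
    show ((dict2.foldl (fun d kv2 => d.modify kv2.2 [] (· ++ [kv2.1]))
        PySem.Dict.empty).get? v).getD ["None"] = pvValFor v dict2
    rw [hnone]
    simp [pvValFor, hm]
  · -- some entry matches, so the stored list (nonempty) is returned, whatever the default
    have hsome : (dict2.foldl (fun d kv2 => d.modify kv2.2 [] (· ++ [kv2.1]))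
        PySem.Dict.empty).get? v = some (pvMatches v dict2) := by
      have hgd : ((dict2.foldl (fun d kv2 => d.modify kv2.2 [] (· ++ [kv2.1]))
          PySem.Dict.empty).get? v).getD [] = pvMatches v dict2 := hget
      cases hg : (dict2.foldl (fun d kv2 => d.modify kv2.2 [] (· ++ [kv2.1]))
          PySem.Dict.empty).get? v with
      | none => rw [hg] at hgd; simp at hgd; exact absurd hgd hm
      | some w => rw [hg] at hgd; simp at hgd; rw [hgd]
    show ((dict2.foldl (fun d kv2 => d.modify kv2.2 [] (· ++ [kv2.1]))
        PySem.Dict.empty).get? v).getD ["None"] = pvValFor v dict2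
    rw [hsome]
    simp [pvValFor, hm]

-- ===== VERDICT (by name: the statement is the Claim_ definition above) =====
theorem create_dict_ip_cctrol_spec : Claim_equal_create_dict_ip_cctrol := by
  intro dict1 dict2 _ hpre
  unfold Spec_create_dict_ip_cctrol create_dict_ip_cctrol create_dict_ip_cctrol_alt
  rw [pv_outer_fold dict2 dict1 PySem.Dict.empty hpre.1 (by intro p _; simp [pysem])]
  congr 2
  funext nd kv
  rw [pv_byValue_getD]
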